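-- pv_equiv track=rewrite | github.com/valault1/solvers | python/wordle/wordle-v2-worse.py | getLetterCountsInGuess
-- ===== SOURCE A (Python) =====
-- def getLetterCountsInGuess(lettersGuessed, word, colors):
--   letterCounts = {}
--   for i in range(len(word)):
--     if colors[i] == 'y' or colors[i] == 'g':
--       if word[i] in letterCounts:
--         letterCounts[word[i]] += 1
--       else:
--         letterCounts[word[i]] = 1
--     else:
--       if word[i] not in letterCounts:
--         letterCounts[word[i]] = 0
--   return letterCounts
-- ===== SOURCE B (Python) =====
-- def getLetterCountsInGuess(lettersGuessed, word, colors):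
--   return {c: sum(colors[i] == 'y' or colors[i] == 'g'
--                  for i in range(len(word)) if word[i] == c)
--           for c in dict.fromkeys(word)}
-- ===== Notes on version B (the rewrite author's own statement) =====
-- stated objective: alternative
-- what changed: B drops A's stateful single-pass dict building entirely: it iterates the distinct letters of word (dict.fromkeys order) and computes each value with a fresh nested scan counting that letter's 'y'/'g' positions, assembling the result as a dict comprehension.
import Mathlib
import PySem

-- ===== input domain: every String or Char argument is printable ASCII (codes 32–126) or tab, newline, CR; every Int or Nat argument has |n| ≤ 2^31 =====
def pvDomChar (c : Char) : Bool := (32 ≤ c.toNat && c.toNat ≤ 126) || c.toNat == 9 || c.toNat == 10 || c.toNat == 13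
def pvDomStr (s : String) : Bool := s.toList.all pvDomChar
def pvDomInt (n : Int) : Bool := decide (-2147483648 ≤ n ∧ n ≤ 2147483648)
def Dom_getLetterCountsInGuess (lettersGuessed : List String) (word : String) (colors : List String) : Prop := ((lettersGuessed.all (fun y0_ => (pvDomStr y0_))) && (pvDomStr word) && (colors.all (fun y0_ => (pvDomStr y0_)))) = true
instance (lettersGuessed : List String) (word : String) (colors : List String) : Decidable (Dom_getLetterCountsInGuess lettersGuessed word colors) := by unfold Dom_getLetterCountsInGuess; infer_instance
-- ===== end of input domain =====

-- B replaces A's stateful single-pass dict building by a per-distinct-letter algorithm: a dict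
-- comprehension over word whose value is a fresh nested scan counting that letter's 'y'/'g'
-- positions; same return value, different (alternative) algorithm.

-- ===== PORT A =====
-- word[i] yields a one-character string: String.ofList [·] of the char; the .getD fallbacks are
-- never taken under Pre_ (every index is in range there).
def getLetterCountsInGuess (lettersGuessed : List String) (word : String) (colors : List String) : List (String × Int) :=
  ((PySem.List.pyRange 0 (PySem.Str.len word) 1).foldl (fun d i =>
      if PySem.List.pyGetD colors i "" == "y" || PySem.List.pyGetD colors i "" == "g" then
        if d.contains (String.ofList [(PySem.Str.pyGet? word i).getD ' ']) then
          d.insert (String.ofList [(PySem.Str.pyGet? word i).getD ' '])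
            (d.getD (String.ofList [(PySem.Str.pyGet? word i).getD ' ']) 0 + 1)
        else
          d.insert (String.ofList [(PySem.Str.pyGet? word i).getD ' ']) 1
      else
        if d.contains (String.ofList [(PySem.Str.pyGet? word i).getD ' ']) then d
        else d.insert (String.ofList [(PySem.Str.pyGet? word i).getD ' ']) 0)
    (PySem.Dict.empty : PySem.Dict String Int)).items

-- ===== PORT B =====
-- {c: sum(colors[i] == 'y' or colors[i] == 'g' for i in range(len(word)) if word[i] == c) for c in dict.fromkeys(word)}
-- dict comprehension = fold of inserts over word's chars (overwrite keeps first-insertion position);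
-- the generator with its 'if' filter = filter then foldl of the bool (0/1) sum.
def getLetterCountsInGuess_alt (lettersGuessed : List String) (word : String) (colors : List String) : List (String × Int) :=
  ((PySem.List.dedup word.toList).foldl (fun d c =>
      d.insert (String.ofList [c])
        (((PySem.List.pyRange 0 (PySem.Str.len word) 1).filter
            (fun i => (PySem.Str.pyGet? word i).getD ' ' == c)).foldl
          (fun s i =>
            s + (if PySem.List.pyGetD colors i "" == "y" || PySem.List.pyGetD colors i "" == "g" then (1 : Int) else 0))
          0))
    (PySem.Dict.empty : PySem.Dict String Int)).items

-- ===== PRECONDITION & SPEC =====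
-- Pre_ excludes exactly the inputs where colors is shorter than word: there Python A (and B) raise IndexError.
def Pre_getLetterCountsInGuess (lettersGuessed : List String) (word : String) (colors : List String) : Prop :=
  word.toList.length ≤ colors.length
instance (lettersGuessed : List String) (word : String) (colors : List String) : Decidable (Pre_getLetterCountsInGuess lettersGuessed word colors) := by unfold Pre_getLetterCountsInGuess; infer_instance
def pvWitness_getLetterCountsInGuess : List String × String × List String :=
  (["ab"], "abca", ["y", "x", "g", "y"])

def Spec_getLetterCountsInGuess (lettersGuessed : List String) (word : String) (colors : List String) (out : List (String × Int)) : Prop := out = getLetterCountsInGuess_alt lettersGuessed word colors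
instance (lettersGuessed : List String) (word : String) (colors : List String) (out : List (String × Int)) : Decidable (Spec_getLetterCountsInGuess lettersGuessed word colors out) := by unfold Spec_getLetterCountsInGuess; infer_instance

-- ===== CLAIM (what is proved, stated in full; the proofs are below) =====
def Claim_equal_getLetterCountsInGuess : Prop := ∀ (lettersGuessed : List String) (word : String) (colors : List String), Dom_getLetterCountsInGuess lettersGuessed word colors → Pre_getLetterCountsInGuess lettersGuessed word colors → Spec_getLetterCountsInGuess lettersGuessed word colors (getLetterCountsInGuess lettersGuessed word colors)

-- ===== LEMMAS AND PROOFS =====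

def pvYG (col : String) : Bool := col == "y" || col == "g"
def pvKey (c : Char) : String := String.ofList [c]

theorem pvKey_inj {c c' : Char} (h : pvKey c = pvKey c') : c = c' := by
  have := congrArg String.toList h
  simpa [pvKey] using this

-- A's loop body on the per-position pair (word char, color)
def pvStepA (d : PySem.Dict String Int) (p : Char × String) : PySem.Dict String Int :=
  if pvYG p.2 then
    if d.contains (pvKey p.1) then d.insert (pvKey p.1) (d.getD (pvKey p.1) 0 + 1)
    else d.insert (pvKey p.1) 1
  else
    if d.contains (pvKey p.1) then d else d.insert (pvKey p.1) 0

def pvCnt (ps : List (Char × String)) (k : String) : Int :=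
  (((ps.filter (fun p => pvYG p.2)).map (fun p => pvKey p.1)).count k : Int)

-- Step 1: a fold of range(len(word)) reading word[i] and colors[i] is a fold over zip(word, colors).
theorem pv_range_fold_eq_zip {σ : Type} (cs : List Char) (colors : List String)
    (h : cs.length ≤ colors.length) (f : σ → Char → String → σ) (init : σ) :
    (List.range cs.length).foldl (fun d k => f d (cs[k]?.getD ' ') (colors.getD k "")) init
    = (cs.zip colors).foldl (fun d p => f d p.1 p.2) init := by
  induction cs generalizing colors init with
  | nil => simp
  | cons c cs ih =>
    cases colors with
    | nil => simp at h
    | cons col colors =>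
      simp only [List.length_cons, List.range_succ_eq_map, List.foldl_cons, List.foldl_map,
        List.getElem?_cons_zero, Option.getD_some, List.getD_cons_zero, List.zip_cons_cons]
      simp only [List.getElem?_cons_succ, List.getD_cons_succ]
      exact ih colors (by simpa using h) (f init c col)

-- keys of a dict insert, as a Set.add
theorem pv_keys_insert (d : PySem.Dict String Int) (k : String) (v : Int) :
    (d.insert k v).keys = PySem.Set.add d.keys k := by
  by_cases hc : d.contains k = true
  · rw [PySem.Dict.keys_insert_of_contains d v hc,
      PySem.Set.add_of_mem ((PySem.Dict.contains_iff_mem_keys d k).mp hc)]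
  · rw [PySem.Dict.keys_insert_of_not_contains d v (by simpa using hc),
      PySem.Set.add_of_not_mem (fun hm => hc ((PySem.Dict.contains_iff_mem_keys d k).mpr hm))]

-- each port's outer fold over pyRange equals the corresponding fold over the zipped list
theorem pv_portA_eq_zip (lettersGuessed : List String) (word : String) (colors : List String)
    (h : word.toList.length ≤ colors.length) :
    getLetterCountsInGuess lettersGuessed word colors
    = ((word.toList.zip colors).foldl pvStepA PySem.Dict.empty).items := by
  unfold getLetterCountsInGuess
  rw [PySem.Str.len_eq, PySem.List.pyRange_zero_nat, List.foldl_map]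
  simp only [PySem.Str.pyGet?_natCast, PySem.List.pyGetD_natCast]
  exact congrArg PySem.Dict.items
    (pv_range_fold_eq_zip word.toList colors h (fun d c col => pvStepA d (c, col))
      PySem.Dict.empty)

-- B's inner generator-sum, for one letter c, counts c's 'y'/'g' positions of the zipped list
theorem pv_inner_eq_cnt_aux (c : Char) :
    ∀ (ps : List (Char × String)) (s : Int),
      ps.foldl (fun s p => if p.1 == c then s + (if p.2 == "y" || p.2 == "g" then (1 : Int) else 0) else s) s
      = s + pvCnt ps (pvKey c) := by
  intro ps
  induction ps with
  | nil => intro s; simp [pvCnt]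
  | cons p ps ih =>
    intro s
    simp only [List.foldl_cons, ih, pvCnt, List.filter_cons]
    by_cases hyg : (p.2 == "y" || p.2 == "g") = true
    · rw [if_pos hyg]
      by_cases hc : p.1 = c
      · simp [pvYG, hyg, hc]
        omega
      · have hk : pvKey p.1 ≠ pvKey c := fun hh => hc (pvKey_inj hh)
        simp [pvYG, hyg, hc, hk]
    · rw [if_neg hyg]
      simp [pvYG, hyg]

theorem pv_inner_eq_cnt (word : String) (colors : List String)
    (h : word.toList.length ≤ colors.length) (c : Char) :
    ((PySem.List.pyRange 0 (PySem.Str.len word) 1).filter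
        (fun i => (PySem.Str.pyGet? word i).getD ' ' == c)).foldl
      (fun s i =>
        s + (if PySem.List.pyGetD colors i "" == "y" || PySem.List.pyGetD colors i "" == "g" then (1 : Int) else 0))
      0
    = pvCnt (word.toList.zip colors) (pvKey c) := by
  rw [← PySem.List.foldl_if_eq_foldl_filter]
  rw [PySem.Str.len_eq, PySem.List.pyRange_zero_nat, List.foldl_map]
  simp only [PySem.Str.pyGet?_natCast, PySem.List.pyGetD_natCast]
  rw [pv_range_fold_eq_zip word.toList colors h
      (fun s ch col => if ch == c then s + (if col == "y" || col == "g" then (1 : Int) else 0) else s) 0]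
  · rw [pv_inner_eq_cnt_aux c (word.toList.zip colors) 0, zero_add]

-- set-map commutation for the injective key map (used for B's dedup'd outer loop)
theorem pv_map_discard (s : List Char) (c : Char) :
    (PySem.Set.discard s c).map pvKey = PySem.Set.discard (s.map pvKey) (pvKey c) := by
  simp only [PySem.Set.discard]
  induction s with
  | nil => simp
  | cons a s ih =>
    by_cases h : a = c
    · simpa [h] using ih
    · have h2 : (pvKey a == pvKey c) = false := by simpa using fun hh => h (pvKey_inj hh)
      simp [h, h2, ih]

theorem pv_ofList_map : ∀ cs : List Char,
    (PySem.Set.ofList cs).map pvKey = PySem.Set.ofList (cs.map pvKey) := by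
  intro cs
  induction cs with
  | nil => simp [PySem.Set.ofList_nil]
  | cons c cs ih =>
    simp only [List.map_cons, PySem.Set.ofList_cons, List.map_cons, pv_map_discard, ih]

-- B's port, under Pre_, is a fold of inserts of the per-letter counts
theorem pv_portB_eq (lettersGuessed : List String) (word : String) (colors : List String)
    (h : word.toList.length ≤ colors.length) :
    getLetterCountsInGuess_alt lettersGuessed word colors
    = ((PySem.Set.ofList word.toList).foldl
        (fun d c => d.insert (pvKey c) (pvCnt (word.toList.zip colors) (pvKey c)))
        PySem.Dict.empty).items := by
  unfold getLetterCountsInGuess_alt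
  simp only [PySem.List.dedup_eq_ofList]
  refine congrArg PySem.Dict.items
    (congrArg (fun f => (PySem.Set.ofList word.toList).foldl f PySem.Dict.empty) ?_)
  funext d c
  rw [pv_inner_eq_cnt word colors h c]
  rfl

-- keys of one A step: always 'add' the current key
theorem pvStepA_keys (d : PySem.Dict String Int) (p : Char × String) :
    (pvStepA d p).keys = PySem.Set.add d.keys (pvKey p.1) := by
  unfold pvStepA
  split_ifs with h1 h2 h3
  · exact pv_keys_insert d (pvKey p.1) _
  · exact pv_keys_insert d (pvKey p.1) _
  · exact (PySem.Set.add_of_mem ((PySem.Dict.contains_iff_mem_keys d (pvKey p.1)).mp h3)).symm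
  · exact pv_keys_insert d (pvKey p.1) _

theorem pvA_keys (ps : List (Char × String)) :
    ∀ d : PySem.Dict String Int,
      (ps.foldl pvStepA d).keys = PySem.Set.update d.keys (ps.map (fun p => pvKey p.1)) := by
  induction ps with
  | nil => intro d; simp [PySem.Set.update_nil]
  | cons p ps ih =>
    intro d
    simp only [List.foldl_cons, List.map_cons, PySem.Set.update_cons, ih (pvStepA d p),
      pvStepA_keys]

-- value of one A step at any key
theorem pvStepA_getD (d : PySem.Dict String Int) (p : Char × String) (k : String) :
    (pvStepA d p).getD k 0
    = d.getD k 0 + (if pvYG p.2 ∧ pvKey p.1 = k then 1 else 0) := by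
  unfold pvStepA
  by_cases hyg : pvYG p.2 = true
  · simp only [hyg, if_true, true_and]
    by_cases hc : d.contains (pvKey p.1) = true
    · rw [if_pos hc, PySem.Dict.getD_insert]
      by_cases hk : k = pvKey p.1
      · rw [if_pos hk, if_pos hk.symm, hk]
      · rw [if_neg hk, if_neg (fun hh => hk hh.symm), add_zero]
    · rw [if_neg hc, PySem.Dict.getD_insert]
      by_cases hk : k = pvKey p.1
      · rw [if_pos hk, if_pos hk.symm, hk,
          PySem.Dict.getD_of_not_contains d 0 (by simpa using hc), zero_add]
      · rw [if_neg hk, if_neg (fun hh => hk hh.symm), add_zero]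
  · simp only [hyg, Bool.false_eq_true, if_false, false_and, add_zero]
    by_cases hc : d.contains (pvKey p.1) = true
    · rw [if_pos hc]
    · rw [if_neg hc, PySem.Dict.getD_insert]
      by_cases hk : k = pvKey p.1
      · rw [if_pos hk, hk, PySem.Dict.getD_of_not_contains d 0 (by simpa using hc)]
      · rw [if_neg hk]

-- A's fold accumulates the count
theorem pvA_getD :
    ∀ (ps : List (Char × String)) (d : PySem.Dict String Int) (k : String),
      (ps.foldl pvStepA d).getD k 0 = d.getD k 0 + pvCnt ps k := by
  intro ps
  induction ps with
  | nil => intro d k; simp [pvCnt]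
  | cons p ps ih =>
    intro d k
    simp only [List.foldl_cons, ih (pvStepA d p) k, pvStepA_getD d p k, pvCnt, List.filter_cons]
    by_cases hyg : pvYG p.2 = true
    · rw [if_pos hyg]
      by_cases hk : pvKey p.1 = k
      · simp [hyg, hk]
        omega
      · simp [hyg, hk]
    · rw [if_neg hyg]
      simp [hyg]

-- B's fold of inserts: keys, and value at each inserted key
theorem pvB_keys (f : Char → Int) (cs : List Char) :
    ∀ d : PySem.Dict String Int,
      ((cs.foldl (fun d c => d.insert (pvKey c) (f c)) d).keys)
      = PySem.Set.update d.keys (cs.map pvKey) := by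
  induction cs with
  | nil => intro d; simp [PySem.Set.update_nil]
  | cons c cs ih =>
    intro d
    simp only [List.foldl_cons, List.map_cons, PySem.Set.update_cons, ih, pv_keys_insert]

theorem pvB_getD (f : Char → Int) (cs : List Char) :
    ∀ (d : PySem.Dict String Int) (c : Char),
      ((cs.foldl (fun d c => d.insert (pvKey c) (f c)) d).getD (pvKey c) 0)
      = if c ∈ cs then f c else d.getD (pvKey c) 0 := by
  induction cs with
  | nil => intro d c; simp
  | cons c' cs ih =>
    intro d c
    simp only [List.foldl_cons, ih, List.mem_cons]
    by_cases hcs : c ∈ cs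
    · simp [hcs]
    · rw [if_neg hcs, PySem.Dict.getD_insert]
      by_cases hc : c = c'
      · rw [if_pos (by rw [hc]), if_pos (Or.inl hc), hc]
      · rw [if_neg (fun hh => hc (pvKey_inj hh)), if_neg (by simp [hc, hcs])]

-- the two final dicts have the same keys list and the same value at every key
theorem pv_dicts_eq (cs : List Char) (colors : List String) (h : cs.length ≤ colors.length) :
    ((cs.zip colors).foldl pvStepA PySem.Dict.empty).items
    = ((PySem.Set.ofList cs).foldl
        (fun d c => d.insert (pvKey c) (pvCnt (cs.zip colors) (pvKey c)))
        PySem.Dict.empty).items := by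
  set ps := cs.zip colors with hps
  have hmapfst : ps.map (fun p => pvKey p.1) = cs.map pvKey := by
    rw [show (fun p : Char × String => pvKey p.1) = (pvKey ∘ Prod.fst) from rfl,
      ← List.map_map, hps, List.map_fst_zip h]
  have hAkeys : ((ps.foldl pvStepA PySem.Dict.empty).keys)
      = PySem.Set.ofList (cs.map pvKey) := by
    rw [pvA_keys ps PySem.Dict.empty, hmapfst]
    simp [PySem.Set.update_nil_left, PySem.Dict.keys_empty]
  have hBkeys : (((PySem.Set.ofList cs).foldl (fun d c => d.insert (pvKey c) (pvCnt ps (pvKey c)))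
        PySem.Dict.empty).keys)
      = PySem.Set.ofList (cs.map pvKey) := by
    rw [pvB_keys (fun c => pvCnt ps (pvKey c)) (PySem.Set.ofList cs) PySem.Dict.empty]
    simp [PySem.Set.update_nil_left, PySem.Dict.keys_empty, pv_ofList_map,
      PySem.Set.ofList_ofList]
  have hAnd : ((ps.foldl pvStepA PySem.Dict.empty).keys).Nodup := by
    rw [hAkeys]; exact PySem.Set.nodup_ofList _
  have hBnd : (((PySem.Set.ofList cs).foldl (fun d c => d.insert (pvKey c) (pvCnt ps (pvKey c)))
        PySem.Dict.empty).keys).Nodup := by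
    rw [hBkeys]; exact PySem.Set.nodup_ofList _
  rw [PySem.Dict.items_eq_map_keys _ hAnd 0, PySem.Dict.items_eq_map_keys _ hBnd 0,
    hAkeys, hBkeys]
  refine List.map_congr_left (fun k hk => ?_)
  rcases List.mem_map.mp ((PySem.Set.mem_ofList _ _).mp hk) with ⟨c, hc, rfl⟩
  rw [pvA_getD ps PySem.Dict.empty (pvKey c), PySem.Dict.getD_empty, zero_add,
    pvB_getD (fun c => pvCnt ps (pvKey c)) (PySem.Set.ofList cs) PySem.Dict.empty c,
    if_pos ((PySem.Set.mem_ofList cs c).mpr hc)]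

-- ===== VERDICT (by name: the statement is the Claim_ definition above) =====
theorem getLetterCountsInGuess_spec : Claim_equal_getLetterCountsInGuess := by
  intro lettersGuessed word colors _hdom hpre
  unfold Spec_getLetterCountsInGuess
  rw [pv_portA_eq_zip lettersGuessed word colors hpre,
    pv_portB_eq lettersGuessed word colors hpre]
  exact pv_dicts_eq word.toList colors hpre
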